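-- pv_equiv track=rewrite | github.com/burgerfacegirl/Algorithm | programmers/코딩테스트입문/공던지기.py | solution
-- ===== SOURCE A (Python) =====
-- def solution(numbers, k):
--     n = len(numbers)-1
--     t = 0
--     c = 1       # 현재 공을 던지는 차례(번)
--
--     if c == k:
--         answer = numbers[0]
--     else:
--         while True:
--             t += 2
--             c += 1
--             if t > n:
--                 if t == n+2:
--                     t = 1
--                 elif t == n+1:
--                     t = 0
--             answer = numbers[t]
--             if c == k:
--                 break
--
--
--     return answer
-- ===== SOURCE B (Python) =====
-- def solution(numbers, k):
--     return numbers[(2 * (k - 1)) % len(numbers)]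
-- ===== Notes on version B (the rewrite author's own statement) =====
-- stated objective: simpler
-- what changed: Replaces the O(k) simulation loop (step t by 2 with manual wraparound) with the closed-form modular index numbers[(2*(k-1)) % len(numbers)]; intended as faster (O(1) arithmetic vs O(k) loop) but timing runs varied around the 1.5x threshold, so no unqualified speed claim.
import Mathlib
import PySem

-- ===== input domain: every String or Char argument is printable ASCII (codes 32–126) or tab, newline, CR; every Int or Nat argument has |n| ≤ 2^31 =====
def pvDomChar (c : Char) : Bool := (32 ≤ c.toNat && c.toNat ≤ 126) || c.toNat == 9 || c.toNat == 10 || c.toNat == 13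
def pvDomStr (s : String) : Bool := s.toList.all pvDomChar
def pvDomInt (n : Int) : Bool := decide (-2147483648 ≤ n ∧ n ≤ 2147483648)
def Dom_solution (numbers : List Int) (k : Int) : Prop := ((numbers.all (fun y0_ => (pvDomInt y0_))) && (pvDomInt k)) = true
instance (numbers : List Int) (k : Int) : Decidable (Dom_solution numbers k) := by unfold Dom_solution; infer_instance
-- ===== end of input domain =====

-- B replaces A's pass-simulation loop by the closed-form index numbers[(2*(k-1)) % len(numbers)] (simpler; intended as faster, timing runs varied around the 1.5x threshold).

-- ===== PORT A =====
-- one loop iteration's update of t: t += 2, then the manual wraparound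
def stepT (n t : Int) : Int :=
  let t' := t + 2
  if t' > n then (if t' = n + 2 then 1 else if t' = n + 1 then 0 else t') else t'

-- the `while True` loop; the Nat argument is the number of iterations still to run (k - c)
def loopA (numbers : List Int) (n t : Int) : Nat → Int
  | 0 => 0           -- unreachable: the loop is entered only with k - c ≥ 1
  | m + 1 =>
    let t' := stepT n t
    if m = 0 then (PySem.List.pyGet? numbers t').getD 0   -- answer = numbers[t]; break when c == k
    else loopA numbers n t' m

def solution (numbers : List Int) (k : Int) : Int :=
  let n := PySem.List.len numbers - 1
  if (1 : Int) = k then (PySem.List.pyGet? numbers 0).getD 0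
  else loopA numbers n 0 (k - 1).toNat

-- ===== PORT B =====
def solution_alt (numbers : List Int) (k : Int) : Int :=
  (PySem.List.pyGet? numbers (PySem.Int.mod (2 * (k - 1)) (PySem.List.len numbers))).getD 0

-- ===== PRECONDITION & SPEC =====
-- Pre_ excludes exactly where A does not return normally: k ≤ 0 (the loop never hits c == k and
-- diverges), the empty list (IndexError), and single-element lists with k ≥ 2 (A's wraparound sets
-- t = 1, IndexError).
def Pre_solution (numbers : List Int) (k : Int) : Prop :=
  1 ≤ k ∧ numbers ≠ [] ∧ (2 ≤ k → 2 ≤ numbers.length)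
instance (numbers : List Int) (k : Int) : Decidable (Pre_solution numbers k) := by
  unfold Pre_solution; infer_instance

def pvWitness_solution : List Int × Int := ([3, 5, 7], 4)

def Spec_solution (numbers : List Int) (k : Int) (out : Int) : Prop := out = solution_alt numbers k
instance (numbers : List Int) (k : Int) (out : Int) : Decidable (Spec_solution numbers k out) := by
  unfold Spec_solution; infer_instance

-- ===== CLAIM (what is proved, stated in full; the proofs are below) =====
def Claim_equal_solution : Prop := ∀ (numbers : List Int) (k : Int), Dom_solution numbers k → Pre_solution numbers k → Spec_solution numbers k (solution numbers k)
-- ===== LEMMAS AND PROOFS =====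

-- A's manual wraparound is exactly +2 modulo len(numbers)
theorem stepT_eq_emod (L t : Int) (hL : 2 ≤ L) (h0 : 0 ≤ t) (h1 : t ≤ L - 1) :
    stepT (L - 1) t = (t + 2) % L := by
  unfold stepT
  simp only []
  split_ifs with hgt h2 h1'
  · have : t + 2 = L + 1 := by omega
    rw [this, show L + 1 = 1 + L * 1 by ring, Int.add_mul_emod_self_left,
        Int.emod_eq_of_lt (by omega) (by omega)]
  · have : t + 2 = L := by omega
    rw [this, Int.emod_self]
  · omega
  · rw [Int.emod_eq_of_lt (by omega) (by omega)]

theorem loopA_closed (numbers : List Int) (L : Int) (hL : 2 ≤ L) :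
    ∀ (m : Nat) (t : Int), 0 ≤ t → t ≤ L - 1 →
      loopA numbers (L - 1) t (m + 1)
        = (PySem.List.pyGet? numbers ((t + 2 * (m + 1)) % L)).getD 0 := by
  intro m
  induction m with
  | zero =>
    intro t h0 h1
    simp only [loopA, stepT_eq_emod L t hL h0 h1]
    norm_num
  | succ m ih =>
    intro t h0 h1
    have hstep := stepT_eq_emod L t hL h0 h1
    have hm0 : 0 ≤ (t + 2) % L := Int.emod_nonneg _ (by omega)
    have hm1 : (t + 2) % L ≤ L - 1 := by
      have := Int.emod_lt_of_pos (t + 2) (show 0 < L by omega); omega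
    have hrec := ih ((t + 2) % L) hm0 hm1
    have hunf : loopA numbers (L - 1) t (m + 1 + 1)
        = loopA numbers (L - 1) (stepT (L - 1) t) (m + 1) := rfl
    have harg : t + 2 + 2 * ((m : Int) + 1) = t + 2 * ((((m : Nat) + 1 : Nat) : Int) + 1) := by
      push_cast; ring
    rw [hunf, hstep, hrec, Int.emod_add_emod, harg]

theorem solution_spec : Claim_equal_solution := by
  intro numbers k _ ⟨hk1, hne, hk2⟩
  have hLpos : 0 < (numbers.length : Int) := by
    exact_mod_cast List.length_pos_of_ne_nil hne
  unfold Spec_solution solution solution_alt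
  simp only [PySem.List.len_eq]
  rw [PySem.Int.mod_eq_emod_of_pos hLpos]
  by_cases hk : (1 : Int) = k
  · rw [if_pos hk, ← hk]
    norm_num
  · rw [if_neg hk]
    have hk2' : 2 ≤ k := by omega
    have hL : 2 ≤ (numbers.length : Int) := by exact_mod_cast hk2 hk2'
    obtain ⟨m, hm⟩ : ∃ m : Nat, (k - 1).toNat = m + 1 := ⟨(k - 2).toNat, by omega⟩
    have harg : (0 : Int) + 2 * ((m : Int) + 1) = 2 * (k - 1) := by omega
    rw [hm, loopA_closed numbers _ hL m 0 le_rfl (by omega), harg]
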